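-- pv_equiv track=rewrite | github.com/fonsecagabriella/CS50 | CS50_Python/week_05_tests/test_plate/plates.py | check_ends_with_number
-- ===== SOURCE A (Python) =====
-- def check_ends_with_number(plate):
--     #“Numbers cannot be used in the middle of a plate;
--     # they must come at the end.
--     # For example, AAA222 would be an acceptable … vanity plate; AAA22A would not be acceptable.
--     # The first number used cannot be a ‘0’.”
--
--     pos_first_digit = None
--     i = 0
--
--     for l in plate:
--         if l.isdigit():
--            pos_first_digit = i
--            break
--         i += 1
--
--     if pos_first_digit is not None:
--         if plate[pos_first_digit] == "0":
--             return False
--         else: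
--             return plate[pos_first_digit:len(plate)].isdigit()
--     else:
--         return True
-- ===== SOURCE B (Python) =====
-- def check_ends_with_number(plate):
--     seen_digit = False
--     for c in plate:
--         if c.isdigit():
--             if not seen_digit:
--                 if c == "0":
--                     return False
--                 seen_digit = True
--         elif seen_digit:
--             return False
--     return True
-- ===== Notes on version B (the rewrite author's own statement) =====
-- stated objective: simpler
-- what changed: Replaced A's two-phase find-first-digit-then-slice-and-isdigit structure with a single left-to-right scan maintaining a seen_digit flag that rejects a zero as first digit or any non-digit after a digit.
import Mathlib
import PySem

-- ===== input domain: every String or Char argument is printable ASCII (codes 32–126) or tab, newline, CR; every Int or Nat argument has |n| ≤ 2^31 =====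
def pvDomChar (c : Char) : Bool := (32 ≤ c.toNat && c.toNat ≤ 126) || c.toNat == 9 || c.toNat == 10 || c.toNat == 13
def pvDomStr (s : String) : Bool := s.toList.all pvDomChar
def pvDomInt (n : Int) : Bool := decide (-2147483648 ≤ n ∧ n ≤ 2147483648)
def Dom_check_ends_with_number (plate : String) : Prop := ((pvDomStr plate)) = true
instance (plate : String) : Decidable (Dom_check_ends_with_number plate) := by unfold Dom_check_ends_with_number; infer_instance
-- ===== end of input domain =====

-- B is a single-pass scan with a seen_digit flag instead of A's find-then-slice two-phase check; same return value, chosen for simplicity.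

-- ===== PORT A =====
-- the 'for l in plate: … break' loop finding the index of the first digit
def pvFindFirstDigit : List Char → Nat → Option Nat
  | [], _ => none
  | c :: cs, i => if PySem.Chars.isdigit c then some i else pvFindFirstDigit cs (i + 1)

def check_ends_with_number (plate : String) : Bool :=
  let cs := plate.toList
  match pvFindFirstDigit cs 0 with
  | some p =>
      if PySem.List.pyGetD cs (p : Int) ' ' == '0' then false
      else PySem.Chars.strIsdigit (PySem.List.slice cs (some (p : Int)) (some (cs.length : Int)))
  | none => true

-- ===== PORT B =====
-- the single for-loop of Source B with its seen_digit flag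
def pvScan : List Char → Bool → Bool
  | [], _ => true
  | c :: cs, seen =>
      if PySem.Chars.isdigit c then
        if !seen then
          if c == '0' then false else pvScan cs true
        else pvScan cs seen
      else if seen then false
      else pvScan cs seen

def check_ends_with_number_alt (plate : String) : Bool :=
  pvScan plate.toList false

-- ===== PRECONDITION & SPEC =====
def Spec_check_ends_with_number (plate : String) (out : Bool) : Prop := out = check_ends_with_number_alt plate
instance (plate : String) (out : Bool) : Decidable (Spec_check_ends_with_number plate out) := by unfold Spec_check_ends_with_number; infer_instance

-- ===== CLAIM (what is proved, stated in full; the proofs are below) =====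
def Claim_equal_check_ends_with_number : Prop := ∀ (plate : String), Dom_check_ends_with_number plate → Spec_check_ends_with_number plate (check_ends_with_number plate)

-- ===== LEMMAS AND PROOFS =====

theorem pvScan_true (cs : List Char) : pvScan cs true = cs.all PySem.Chars.isdigit := by
  induction cs with
  | nil => rfl
  | cons c cs ih =>
    by_cases h : PySem.Chars.isdigit c
    · simp [pvScan, h, ih]
    · simp [pvScan, h]

theorem pvFindFirstDigit_shift (cs : List Char) (i : Nat) :
    pvFindFirstDigit cs i = (pvFindFirstDigit cs 0).map (· + i) := by
  induction cs generalizing i with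
  | nil => rfl
  | cons c cs ih =>
    by_cases h : PySem.Chars.isdigit c
    · simp [pvFindFirstDigit, h]
    · rw [pvFindFirstDigit, pvFindFirstDigit, if_neg h, if_neg h, ih (i + 1), ih 1]
      cases pvFindFirstDigit cs 0 <;> simp <;> omega

theorem main_list (cs : List Char) :
    (match pvFindFirstDigit cs 0 with
      | some p =>
        if PySem.List.pyGetD cs (p : Int) ' ' == '0' then false
        else PySem.Chars.strIsdigit (PySem.List.slice cs (some (p : Int)) (some (cs.length : Int)))
      | none => true) = pvScan cs false := by
  induction cs with
  | nil => rfl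
  | cons c cs ih =>
    by_cases h : PySem.Chars.isdigit c
    · have hf : pvFindFirstDigit (c :: cs) 0 = some 0 := by
        rw [pvFindFirstDigit, if_pos h]
      by_cases h0 : c = '0'
      · subst h0
        have hd : PySem.Chars.isdigit '0' = true := by decide
        simp [hf, pvScan, hd]
      · have hsl : PySem.List.slice (c :: cs) none (some ((cs.length : Int) + 1)) = c :: cs := by
          rw [show ((cs.length : Int) + 1) = ((cs.length + 1 : Nat) : Int) from by push_cast; ring,
            PySem.List.slice_to_natCast]
          simp
        simp [hf, h0, hsl, pvScan, h, pvScan_true, PySem.Chars.strIsdigit]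
    · rw [show pvFindFirstDigit (c :: cs) 0 = (pvFindFirstDigit cs 0).map (· + 1) from by
        rw [pvFindFirstDigit, if_neg h, pvFindFirstDigit_shift cs 1]]
      rw [show pvScan (c :: cs) false = pvScan cs false from by simp [pvScan, h]]
      rw [← ih]
      cases hp : pvFindFirstDigit cs 0 with
      | none => rfl
      | some p =>
        simp only [Option.map_some]
        have hget : PySem.List.pyGetD (c :: cs) (((p + 1 : Nat)) : Int) ' '
            = PySem.List.pyGetD cs ((p : Nat) : Int) ' ' := by
          rw [PySem.List.pyGetD_natCast, PySem.List.pyGetD_natCast]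
          simp
        have hslice : PySem.List.slice (c :: cs) (some (((p + 1 : Nat)) : Int))
              (some ((((c :: cs).length : Nat)) : Int))
            = PySem.List.slice cs (some ((p : Nat) : Int)) (some ((cs.length : Nat) : Int)) := by
          rw [PySem.List.slice_natCast, PySem.List.slice_natCast]
          simp only [List.drop_succ_cons, List.length_cons]
          congr 1
          omega
        rw [hget, hslice]

theorem check_ends_with_number_spec : Claim_equal_check_ends_with_number := by
  intro plate _
  unfold Spec_check_ends_with_number check_ends_with_number check_ends_with_number_alt
  exact main_list plate.toList
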